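-- pv_equiv track=rewrite | github.com/MNoichl/data-driven-philosophy-GAP2025 | slides/louvain_demo.py | _relabel_partition_dense_with_map
-- ===== SOURCE A (Python) =====
-- def _relabel_partition_dense_with_map(partition):
--     """Given node->old_label, return (node->dense_label, old_label->dense_label)."""
--     old_to_dense, next_id, dense = {}, 0, {}
--     for n, c in partition.items():
--         if c not in old_to_dense:
--             old_to_dense[c] = next_id
--             next_id += 1
--         dense[n] = old_to_dense[c]
--     return dense, old_to_dense
-- ===== SOURCE B (Python) =====
-- def _relabel_partition_dense_with_map(partition):
--     """Given node->old_label, return (node->dense_label, old_label->dense_label)."""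
--     vals = list(partition.values())
--
--     def rank(c):
--         # dense id of a label = number of distinct labels before its first occurrence
--         return len(set(vals[:vals.index(c)]))
--
--     dense = {n: rank(c) for n, c in partition.items()}
--     old_to_dense = {c: rank(c) for c in dict.fromkeys(vals)}
--     return dense, old_to_dense
-- ===== Notes on version B (the rewrite author's own statement) =====
-- stated objective: alternative
-- what changed: Replaces A's stateful scan (a growing label->id dict with an incremented next_id counter) by a non-incremental counting formula: a label's dense id is computed directly as the number of distinct labels strictly before its first occurrence (len(set(vals[:vals.index(c)]))), applied per node and per distinct label.
import Mathlib
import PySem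

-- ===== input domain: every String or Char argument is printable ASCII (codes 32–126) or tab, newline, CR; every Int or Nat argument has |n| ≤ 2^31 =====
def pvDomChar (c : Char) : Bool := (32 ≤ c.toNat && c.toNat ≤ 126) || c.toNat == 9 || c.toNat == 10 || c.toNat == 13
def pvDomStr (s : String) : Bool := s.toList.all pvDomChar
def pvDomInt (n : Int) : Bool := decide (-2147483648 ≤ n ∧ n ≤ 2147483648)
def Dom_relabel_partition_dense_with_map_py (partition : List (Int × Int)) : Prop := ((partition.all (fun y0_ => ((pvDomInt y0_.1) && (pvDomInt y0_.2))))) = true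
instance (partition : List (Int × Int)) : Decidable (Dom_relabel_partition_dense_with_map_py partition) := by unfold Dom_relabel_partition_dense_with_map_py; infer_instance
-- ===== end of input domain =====

-- B replaces A's stateful counter scan by a counting formula: the dense id of a label is the
-- number of distinct labels strictly before its first occurrence; objective: alternative
-- (a genuinely different, non-incremental algorithm; O(n^2) instead of A's O(n) single pass).

-- ===== PORT A =====
-- loop body of A: if c not in old_to_dense: old_to_dense[c] = next_id; next_id += 1; dense[n] = old_to_dense[c]
-- (old_to_dense[c] after the if always succeeds — the key was just ensured — so getD is exact here)
def relabelStepA (st : PySem.Dict Int Int × Int × PySem.Dict Int Int) (p : Int × Int) :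
    PySem.Dict Int Int × Int × PySem.Dict Int Int :=
  let (otd', next') :=
    if st.1.contains p.2 then (st.1, st.2.1) else (st.1.insert p.2 st.2.1, st.2.1 + 1)
  (otd', next', st.2.2.insert p.1 (otd'.getD p.2 0))

def relabel_partition_dense_with_map_py (partition : List (Int × Int)) :
    (List (Int × Int)) × (List (Int × Int)) :=
  let st := partition.foldl relabelStepA (PySem.Dict.empty, 0, PySem.Dict.empty)
  (st.2.2.items, st.1.items)

-- ===== PORT B =====
-- rank(c) = len(set(vals[:vals.index(c)]))  — number of distinct labels before c's first occurrence
-- (vals.index(c) succeeds on every call B makes: c is always drawn from vals, so getD 0 is exact)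
def rankB (vals : List Int) (c : Int) : Int :=
  ((PySem.Set.ofList (PySem.List.slice vals none
      (some (((PySem.List.index? vals c).getD 0 : Nat) : Int)))).length : Int)

def relabel_partition_dense_with_map_py_alt (partition : List (Int × Int)) :
    (List (Int × Int)) × (List (Int × Int)) :=
  let vals := partition.map (·.2)                                     -- list(partition.values())
  let dense := partition.foldl
    (fun d p => d.insert p.1 (rankB vals p.2)) PySem.Dict.empty       -- {n: rank(c) for n, c in …}
  let old_to_dense := (PySem.List.dedup vals).foldl
    (fun d c => d.insert c (rankB vals c)) PySem.Dict.empty           -- {c: rank(c) for c in dict.fromkeys(vals)}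
  (dense.items, old_to_dense.items)

-- ===== PRECONDITION & SPEC =====
def Spec_relabel_partition_dense_with_map_py (partition : List (Int × Int)) (out : (List (Int × Int)) × (List (Int × Int))) : Prop := out = relabel_partition_dense_with_map_py_alt partition
instance (partition : List (Int × Int)) (out : (List (Int × Int)) × (List (Int × Int))) : Decidable (Spec_relabel_partition_dense_with_map_py partition out) := by unfold Spec_relabel_partition_dense_with_map_py; infer_instance

-- ===== CLAIM (what is proved, stated in full; the proofs are below) =====
def Claim_equal_relabel_partition_dense_with_map_py : Prop := ∀ (partition : List (Int × Int)), Dom_relabel_partition_dense_with_map_py partition → Spec_relabel_partition_dense_with_map_py partition (relabel_partition_dense_with_map_py partition)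

-- ===== LEMMAS AND PROOFS =====

-- A's old_to_dense, as a function of the value list (first-occurrence enumeration)
def otdOf (vals : List Int) : PySem.Dict Int Int :=
  (PySem.List.enumerate (PySem.List.dedup vals)).foldl (fun d p => d.insert p.2 p.1) PySem.Dict.empty

-- A's dense pass, relative to an (arbitrary) finished table m
def denseOf (l : List (Int × Int)) (m : PySem.Dict Int Int) : PySem.Dict Int Int :=
  l.foldl (fun d p => d.insert p.1 (m.getD p.2 0)) PySem.Dict.empty

lemma dedup_append_singleton (xs : List Int) (x : Int) :
    PySem.List.dedup (xs ++ [x])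
      = if x ∈ xs then PySem.List.dedup xs else PySem.List.dedup xs ++ [x] := by
  have h : PySem.List.dedup (xs ++ [x]) = PySem.Set.add (PySem.List.dedup xs) x := by
    simp [PySem.List.dedup, PySem.Set.ofList, List.foldl_append]
  rw [h]
  by_cases hx : x ∈ xs
  · simp [PySem.Set.add, hx]
  · simp [PySem.Set.add, hx]

lemma otdOf_append (vals : List Int) (x : Int) :
    otdOf (vals ++ [x])
      = if x ∈ vals then otdOf vals
        else (otdOf vals).insert x ((PySem.List.dedup vals).length : Int) := by
  unfold otdOf
  rw [dedup_append_singleton]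
  by_cases hx : x ∈ vals
  · simp [hx]
  · simp only [hx, ite_false]
    rw [PySem.List.enumerate_append, List.foldl_append]
    simp [PySem.List.enumerate]

lemma contains_otdOf (vals : List Int) (c : Int) :
    (otdOf vals).contains c = decide (c ∈ vals) := by
  induction vals using List.reverseRecOn with
  | nil => rfl
  | append_singleton xs x ih =>
      rw [otdOf_append]
      by_cases hx : x ∈ xs
      · simp only [hx, ite_true, ih]
        by_cases hc : c ∈ xs
        · simp [hc, List.mem_append]
        · simp only [List.mem_append, List.mem_singleton]
          by_cases hcx : c = x
          · subst hcx; simp [hx]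
          · simp [hc, hcx]
      · simp only [hx, ite_false]
        rw [PySem.Dict.contains_insert, ih]
        by_cases hcx : c = x
        · subst hcx; simp
        · simp [hcx, List.mem_append]

lemma denseOf_congr_aux (l : List (Int × Int)) (m1 m2 : PySem.Dict Int Int)
    (d : PySem.Dict Int Int)
    (h : ∀ c ∈ l.map (·.2), m1.getD c 0 = m2.getD c 0) :
    l.foldl (fun d p => d.insert p.1 (m1.getD p.2 0)) d
      = l.foldl (fun d p => d.insert p.1 (m2.getD p.2 0)) d := by
  induction l generalizing d with
  | nil => rfl
  | cons p ps ih =>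
      simp only [List.foldl_cons]
      rw [h p.2 (by simp), ih _ (fun c hc => h c (by simp [hc]))]

lemma denseOf_append (l : List (Int × Int)) (p : Int × Int) (m : PySem.Dict Int Int) :
    denseOf (l ++ [p]) m = (denseOf l m).insert p.1 (m.getD p.2 0) := by
  unfold denseOf; rw [List.foldl_append]; rfl

lemma foldA_eq (l : List (Int × Int)) :
    l.foldl relabelStepA (PySem.Dict.empty, 0, PySem.Dict.empty)
      = (otdOf (l.map (·.2)), ((PySem.List.dedup (l.map (·.2))).length : Int),
         denseOf l (otdOf (l.map (·.2)))) := by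
  induction l using List.reverseRecOn with
  | nil => rfl
  | append_singleton xs p ih =>
      rw [List.foldl_append, ih]
      have hmap : (xs ++ [p]).map (·.2) = xs.map (·.2) ++ [p.2] := by simp
      rw [hmap, otdOf_append, dedup_append_singleton]
      by_cases hx : p.2 ∈ xs.map (·.2)
      · simp only [hx, if_pos]
        unfold relabelStepA
        simp only [List.foldl_cons, List.foldl_nil]
        rw [contains_otdOf]
        simp only [hx, decide_true, ite_true]
        rw [denseOf_append]
      · simp only [hx, ite_false]
        unfold relabelStepA
        simp only [List.foldl_cons, List.foldl_nil]
        rw [contains_otdOf]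
        simp only [hx, decide_false, Bool.false_eq_true, ite_false]
        rw [denseOf_append]
        have hcongr : denseOf xs ((otdOf (xs.map (·.2))).insert p.2
              ((PySem.List.dedup (xs.map (·.2))).length : Int))
            = denseOf xs (otdOf (xs.map (·.2))) := by
          apply denseOf_congr_aux
          intro c hc
          exact PySem.Dict.getD_insert_of_ne _ _ _ (fun h => hx (h ▸ hc))
        rw [hcongr, PySem.Dict.getD_insert_self]
        simp

-- rank as an index: for c ∈ vals, rank(c) is c's position in the first-occurrence dedup list
lemma rank_eq_idx (vals : List Int) (c : Int) (hc : c ∈ vals) :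
    rankB vals c = (((PySem.List.index? (PySem.List.dedup vals) c).getD 0 : Nat) : Int) := by
  induction vals using List.reverseRecOn with
  | nil => cases hc
  | append_singleton xs x ih =>
      by_cases hcx : c ∈ xs
      · -- c already occurs in xs: index, prefix and dedup position are unchanged
        obtain ⟨i, hi⟩ : ∃ i, PySem.List.index? xs c = some i :=
          Option.isSome_iff_exists.mp ((PySem.List.index?_isSome_iff xs c).mpr hcx)
        obtain ⟨pre, suf, hsplit, hlen, _⟩ := (PySem.List.index?_eq_some_iff xs c i).mp hi
        have hile : i ≤ xs.length := by
          subst hlen; rw [hsplit]; simp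
        have hidx : PySem.List.index? (xs ++ [x]) c = some i := by
          rw [PySem.List.index?_append_of_mem _ hcx, hi]
        have hslice : ∀ (l : List Int), PySem.List.slice l none (some ((i : Nat) : Int)) = l.take i :=
          fun l => PySem.List.slice_to_natCast l i
        have htake : (xs ++ [x]).take i = xs.take i :=
          List.take_append_of_le_length hile
        have hrank : rankB (xs ++ [x]) c = rankB xs c := by
          unfold rankB
          rw [hidx, hi]
          simp only [Option.getD_some]
          rw [hslice, hslice, htake]
        rw [hrank, ih hcx, dedup_append_singleton]
        by_cases hx : x ∈ xs
        · simp [hx]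
        · simp only [hx, ite_false]
          rw [PySem.List.index?_append_of_mem _ ((PySem.List.mem_dedup xs c).mpr hcx)]
      · -- c = x is a new label: its rank is the number of distinct labels in xs
        have hcx' : c = x := by
          rcases List.mem_append.mp hc with h | h
          · exact absurd h hcx
          · simpa using h
        subst hcx'
        have hidx : PySem.List.index? (xs ++ [c]) c = some xs.length :=
          PySem.List.index?_append_singleton_self xs c hcx
        have hrank : rankB (xs ++ [c]) c = ((PySem.Set.ofList xs).length : Int) := by
          unfold rankB
          rw [hidx]
          simp only [Option.getD_some]
          rw [PySem.List.slice_to_natCast, List.take_left]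
        rw [hrank, dedup_append_singleton]
        simp only [hcx, ite_false]
        rw [PySem.List.index?_append_singleton_self _ c
              (fun h => hcx ((PySem.List.mem_dedup xs c).mp h))]
        simp [PySem.List.dedup]

-- position of the i-th element of a nodup list
lemma index?_getElem_of_nodup (l : List Int) (hnd : l.Nodup) (i : Nat) (hi : i < l.length) :
    PySem.List.index? l l[i] = some i := by
  rw [PySem.List.index?_eq_idxOf?, List.idxOf?_eq_some_iff]
  refine ⟨hi, rfl, fun j hj hbad => ?_⟩
  have := (List.Nodup.getElem_inj_iff hnd).mp hbad
  omega

-- A's old_to_dense equals B's: both list the distinct labels in first-occurrence order with their ranks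
lemma otd_eq (vals : List Int) :
    otdOf vals
      = (PySem.List.dedup vals).foldl (fun d c => d.insert c (rankB vals c)) PySem.Dict.empty := by
  apply PySem.Dict.ext
  have hndk : (PySem.List.dedup vals).Nodup := PySem.List.nodup_dedup vals
  have hA : (otdOf vals).items
      = (PySem.List.enumerate (PySem.List.dedup vals)).map (fun p => (p.2, p.1)) := by
    unfold otdOf
    have := PySem.Dict.items_foldl_insert_fresh
      (PySem.List.enumerate (PySem.List.dedup vals)) (fun p => p.2) (fun p => p.1)
      PySem.Dict.empty
      (by intro a _; simp [PySem.Dict.contains_empty])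
      (by rw [PySem.List.map_snd_enumerate]; exact hndk)
    simp at this
    exact this
  have hB : ((PySem.List.dedup vals).foldl
        (fun d c => d.insert c (rankB vals c)) PySem.Dict.empty).items
      = (PySem.List.dedup vals).map (fun c => (c, rankB vals c)) := by
    have := PySem.Dict.items_foldl_insert_fresh
      (PySem.List.dedup vals) (fun c => c) (fun c => rankB vals c)
      PySem.Dict.empty
      (by intro a _; simp [PySem.Dict.contains_empty])
      (by simpa using hndk)
    simpa using this
  rw [hA, hB]
  apply List.ext_getElem
  · simp [PySem.List.length_enumerate]
  · intro i hi1 hi2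
    have hlen : i < (PySem.List.dedup vals).length := by
      simpa [PySem.List.length_enumerate] using hi1
    have hmem : (PySem.List.dedup vals)[i] ∈ vals :=
      (PySem.List.mem_dedup vals _).mp (List.getElem_mem hlen)
    simp only [List.getElem_map, PySem.List.getElem_enumerate]
    rw [rank_eq_idx vals _ hmem,
        index?_getElem_of_nodup _ (PySem.List.nodup_dedup vals) i hlen]
    simp

-- lookup in A's table is B's rank
lemma getD_otdOf (vals : List Int) (c : Int) (hc : c ∈ vals) :
    (otdOf vals).getD c 0 = rankB vals c := by
  have hitems : (otdOf vals).items = (PySem.List.dedup vals).map (fun c => (c, rankB vals c)) := by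
    rw [otd_eq]
    have := PySem.Dict.items_foldl_insert_fresh
      (PySem.List.dedup vals) (fun c => c) (fun c => rankB vals c)
      PySem.Dict.empty
      (by intro a _; simp [PySem.Dict.contains_empty])
      (by simpa using PySem.List.nodup_dedup vals)
    simpa using this
  have hkeys : (otdOf vals).keys = PySem.List.dedup vals := by
    simp only [PySem.Dict.keys, hitems, List.map_map]
    simp [Function.comp_def]
  exact PySem.Dict.getD_of_mem_items _
    (by rw [hitems]; exact List.mem_map.mpr ⟨c, (PySem.List.mem_dedup vals c).mpr hc, rfl⟩)
    (by rw [hkeys]; exact PySem.List.nodup_dedup vals) 0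

lemma foldl_insert_fun_congr (l : List (Int × Int)) (f g : Int × Int → Int)
    (d : PySem.Dict Int Int) (h : ∀ q ∈ l, f q = g q) :
    l.foldl (fun d q => d.insert q.1 (f q)) d = l.foldl (fun d q => d.insert q.1 (g q)) d := by
  induction l generalizing d with
  | nil => rfl
  | cons q qs ih =>
      simp only [List.foldl_cons]
      rw [h q (by simp), ih _ (fun r hr => h r (by simp [hr]))]

theorem relabel_ab (p : List (Int × Int)) :
    relabel_partition_dense_with_map_py p = relabel_partition_dense_with_map_py_alt p := by
  unfold relabel_partition_dense_with_map_py relabel_partition_dense_with_map_py_alt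
  rw [foldA_eq]
  have hdense : denseOf p (otdOf (p.map (·.2)))
      = p.foldl (fun d q => d.insert q.1 (rankB (p.map (·.2)) q.2)) PySem.Dict.empty := by
    unfold denseOf
    exact foldl_insert_fun_congr p _ _ _
      (fun q hq => getD_otdOf _ _ (List.mem_map.mpr ⟨q, hq, rfl⟩))
  rw [hdense, otd_eq]

-- ===== VERDICT (by name: the statement is the Claim_ definition above) =====
theorem relabel_partition_dense_with_map_py_spec : Claim_equal_relabel_partition_dense_with_map_py := by
  intro partition _
  unfold Spec_relabel_partition_dense_with_map_py
  exact relabel_ab partition
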